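-- pv_equiv track=rewrite | github.com/rdailey274455/WoodyPyzzle | woody.py | piece_pic_to_coords
-- ===== SOURCE A (Python) =====
-- def piece_pic_to_coords(piece_pic):
--     row=0
--     col=0
--     piece_coords=list()
--     for ci in range(len(piece_pic)):
--         if piece_pic[ci]=='N':
--             row+=1
--             col=0
--         else:
--             if piece_pic[ci]=='L':
--                 piece_coords.append((col,row))
--             col+=1
--     return piece_coords
-- ===== SOURCE B (Python) =====
-- def piece_pic_to_coords(piece_pic):
--     return [(col, row)
--             for row, seg in enumerate(piece_pic.split('N'))
--             for col, ch in enumerate(seg)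
--             if ch == 'L']
-- ===== Notes on version B (the rewrite author's own statement) =====
-- stated objective: simpler
-- what changed: Replaces the explicit row/col state machine over character indices with a split on the row-separator character followed by a nested enumerate comprehension over segments and their characters.
import Mathlib
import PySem

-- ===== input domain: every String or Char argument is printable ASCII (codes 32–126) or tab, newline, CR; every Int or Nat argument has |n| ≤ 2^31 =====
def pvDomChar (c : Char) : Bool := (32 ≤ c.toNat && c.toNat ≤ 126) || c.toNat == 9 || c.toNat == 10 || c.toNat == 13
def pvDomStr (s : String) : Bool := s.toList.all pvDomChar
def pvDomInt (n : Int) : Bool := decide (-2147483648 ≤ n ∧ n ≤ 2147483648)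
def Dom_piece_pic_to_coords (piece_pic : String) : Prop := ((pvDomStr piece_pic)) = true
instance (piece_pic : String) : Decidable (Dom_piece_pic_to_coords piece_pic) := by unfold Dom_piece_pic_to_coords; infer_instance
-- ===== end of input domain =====

-- B replaces A's row/col state machine with split-on-'N' plus a nested-enumerate comprehension (simpler; return value only, no mutation involved).

-- ===== PORT A =====
-- A's index loop, one character per step, carrying the (row, col, piece_coords) state.
def pieceLoopA : List Char → Int → Int → List (Int × Int) → List (Int × Int)
  | [], _, _, acc => acc
  | ch :: cs, row, col, acc =>
    if ch = 'N' then
      pieceLoopA cs (row + 1) 0 acc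
    else
      pieceLoopA cs row (col + 1) (if ch = 'L' then acc ++ [(col, row)] else acc)

def piece_pic_to_coords (piece_pic : String) : List (Int × Int) :=
  pieceLoopA piece_pic.toList 0 0 []

-- ===== PORT B =====
-- piece_pic.split('N') ported by hand for the single-character separator 'N':
-- exact for a one-character non-empty separator (empty segments kept, trailing segment kept).
def splitN : List Char → List (List Char)
  | [] => [[]]
  | c :: cs =>
    if c = 'N' then [] :: splitN cs
    else (c :: (splitN cs).headI) :: (splitN cs).tail

-- inner part of the comprehension: one segment seg at row r, columns enumerated from c
def rcells (seg : List Char) (r c : Int) : List (Int × Int) :=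
  (PySem.List.enumerate seg c).filterMap (fun p => if p.2 = 'L' then some (p.1, r) else none)

-- outer part: segments enumerated as rows starting at r
def allc (ss : List (List Char)) (r : Int) : List (Int × Int) :=
  (PySem.List.enumerate ss r).flatMap (fun p => rcells p.2 p.1 0)

def piece_pic_to_coords_alt (piece_pic : String) : List (Int × Int) :=
  allc (splitN piece_pic.toList) 0

-- ===== PRECONDITION & SPEC =====
def Spec_piece_pic_to_coords (piece_pic : String) (out : List (Int × Int)) : Prop := out = piece_pic_to_coords_alt piece_pic
instance (piece_pic : String) (out : List (Int × Int)) : Decidable (Spec_piece_pic_to_coords piece_pic out) := by unfold Spec_piece_pic_to_coords; infer_instance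

-- ===== CLAIM (what is proved, stated in full; the proofs are below) =====
def Claim_equal_piece_pic_to_coords : Prop := ∀ (piece_pic : String), Dom_piece_pic_to_coords piece_pic → Spec_piece_pic_to_coords piece_pic (piece_pic_to_coords piece_pic)

-- ===== LEMMAS AND PROOFS =====

-- accumulator-free form of A's loop
def cells : List Char → Int → Int → List (Int × Int)
  | [], _, _ => []
  | ch :: cs, row, col =>
    if ch = 'N' then cells cs (row + 1) 0
    else (if ch = 'L' then [(col, row)] else []) ++ cells cs row (col + 1)

theorem pieceLoopA_eq_cells (cs : List Char) : ∀ (row col : Int) (acc : List (Int × Int)),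
    pieceLoopA cs row col acc = acc ++ cells cs row col := by
  induction cs with
  | nil => intro row col acc; simp [pieceLoopA, cells]
  | cons ch cs ih =>
    intro row col acc
    by_cases h : ch = 'N' <;> by_cases h' : ch = 'L' <;>
      simp [pieceLoopA, cells, h, h', ih]

theorem splitN_ne_nil (cs : List Char) : splitN cs ≠ [] := by
  cases cs with
  | nil => simp [splitN]
  | cons c cs => by_cases h : c = 'N' <;> simp [splitN, h]

theorem splitN_headI_tail (cs : List Char) : splitN cs = (splitN cs).headI :: (splitN cs).tail := by
  cases hs : splitN cs with
  | nil => exact absurd hs (splitN_ne_nil cs)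
  | cons a t => simp

theorem rcells_nil (r c : Int) : rcells [] r c = [] := by
  simp [rcells, PySem.List.enumerate_nil]

theorem rcells_cons (ch : Char) (seg : List Char) (r c : Int) :
    rcells (ch :: seg) r c = (if ch = 'L' then [(c, r)] else []) ++ rcells seg r (c + 1) := by
  by_cases h : ch = 'L' <;> simp [rcells, PySem.List.enumerate_cons, h]

theorem allc_nil (r : Int) : allc [] r = [] := by
  simp [allc, PySem.List.enumerate_nil]

theorem allc_cons (s : List Char) (ss : List (List Char)) (r : Int) :
    allc (s :: ss) r = rcells s r 0 ++ allc ss (r + 1) := by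
  simp [allc, PySem.List.enumerate_cons]

theorem cells_eq_split (cs : List Char) : ∀ (row col : Int),
    cells cs row col = rcells (splitN cs).headI row col ++ allc (splitN cs).tail (row + 1) := by
  induction cs with
  | nil => intro row col; simp [splitN, cells, rcells_nil, allc_nil]
  | cons ch cs ih =>
    intro row col
    by_cases h : ch = 'N'
    · have hsplit : splitN cs = (splitN cs).headI :: (splitN cs).tail :=
        (List.cons_head!_tail (splitN_ne_nil cs)).symm
      calc cells (ch :: cs) row col = cells cs (row + 1) 0 := by simp [cells, h]
        _ = rcells (splitN cs).headI (row + 1) 0 ++ allc (splitN cs).tail (row + 2) := by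
              rw [ih]; ring_nf
        _ = allc (splitN cs) (row + 1) := by
              conv_rhs => rw [hsplit, allc_cons]
              ring_nf
        _ = rcells (splitN (ch :: cs)).headI row col ++ allc (splitN (ch :: cs)).tail (row + 1) := by
              simp [splitN, h, rcells_nil]
    · simp only [splitN, if_neg h, List.headI_cons, List.tail_cons]
      rw [rcells_cons, List.append_assoc, ← ih]
      simp [cells, h]

-- ===== VERDICT (by name: the statement is the Claim_ definition above) =====
theorem piece_pic_to_coords_spec : Claim_equal_piece_pic_to_coords := by
  intro piece_pic _
  unfold Spec_piece_pic_to_coords piece_pic_to_coords piece_pic_to_coords_alt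
  rw [pieceLoopA_eq_cells, cells_eq_split, List.nil_append]
  conv_rhs => rw [splitN_headI_tail piece_pic.toList, allc_cons]
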